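-- pv_equiv track=rewrite | github.com/queriamin/AIGodFather | 300_math/2004_sw.py | combination_zeros
-- ===== SOURCE A (Python) =====
-- def combination_zeros(n: int, m: int) -> int:
--     """
--     르장드르 공식을 사용해 nCm의 끝자리 0의 개수를 반환합니다.
--     """
--
--     def count_prime_factors(k: int, p: int) -> int:
--         """
--         k! (k 팩토리얼) 안에 있는 소수 p의 개수를 셉니다.
--         """
--         count = 0
--         while k >= p:
--             k //= p
--             count += k
--         return count
--
--     # n! / (m! * (n-m)!)
--
--     # 2의 개수 계산
--     two_count = count_prime_factors(n, 2) - count_prime_factors(m, 2) - count_prime_factors(n - m, 2)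
--
--     # 5의 개수 계산
--     five_count = count_prime_factors(n, 5) - count_prime_factors(m, 5) - count_prime_factors(n - m, 5)
--
--     # 10을 만들 수 있는 쌍의 개수는 2와 5의 개수 중 더 적은 값입니다.
--     return min(two_count, five_count)
-- ===== SOURCE B (Python) =====
-- def combination_zeros(n: int, m: int) -> int:
--     def legendre(k: int, p: int) -> int:
--         # v_p(k!) via the digit-sum closed form: (k - s_p(k)) // (p - 1)
--         if k <= 0:
--             return 0
--         s, t = 0, k
--         while t > 0:
--             s += t % p
--             t //= p
--         return (k - s) // (p - 1)
--
--     two_count = legendre(n, 2) - legendre(m, 2) - legendre(n - m, 2)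
--     five_count = legendre(n, 5) - legendre(m, 5) - legendre(n - m, 5)
--     return min(two_count, five_count)
-- ===== Notes on version B (the rewrite author's own statement) =====
-- stated objective: alternative
-- what changed: Each factorial's prime exponent is computed by the digit-sum closed form v_p(k!) = (k - digit_sum_base_p(k)) // (p-1) instead of A's Legendre loop that accumulates successive floor quotients.
import Mathlib
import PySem

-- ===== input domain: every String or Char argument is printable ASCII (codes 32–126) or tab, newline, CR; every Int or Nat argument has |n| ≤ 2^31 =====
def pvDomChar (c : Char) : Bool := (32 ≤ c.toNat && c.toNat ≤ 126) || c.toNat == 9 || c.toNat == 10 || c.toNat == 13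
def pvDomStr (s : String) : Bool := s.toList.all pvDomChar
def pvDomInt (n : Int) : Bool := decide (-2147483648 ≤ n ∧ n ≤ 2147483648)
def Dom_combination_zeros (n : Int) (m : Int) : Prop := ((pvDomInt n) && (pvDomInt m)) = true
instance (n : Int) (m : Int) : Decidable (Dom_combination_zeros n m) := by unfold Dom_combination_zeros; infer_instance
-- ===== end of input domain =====

-- B replaces A's Legendre accumulation loop by the digit-sum closed form v_p(k!) = (k - s_p(k)) // (p-1); same cost, different derivation.

-- ===== PORT A =====
-- termination helpers for both loop recursions
theorem pv_floordiv_lt (p k : Int) (hp : 2 ≤ p) (hk : 0 < k) : PySem.Int.floordiv k p < k := by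
  rw [PySem.Int.floordiv_lt_iff_lt_mul (by omega)]
  nlinarith

-- A's inner loop `while k >= p: k //= p; count += k`, accumulated count written as recursion.
-- `hp : 2 ≤ p` only justifies termination; A calls it with p = 2 and p = 5.
def pvCountPF (p : Int) (hp : 2 ≤ p) (k : Int) : Int :=
  if _h : p ≤ k then
    let k' := PySem.Int.floordiv k p
    k' + pvCountPF p hp k'
  else 0
termination_by k.toNat
decreasing_by
  have hlt : PySem.Int.floordiv k p < k := pv_floordiv_lt p k hp (by omega)
  omega

def combination_zeros (n : Int) (m : Int) : Int :=
  let two_count := pvCountPF 2 (by norm_num) n - pvCountPF 2 (by norm_num) m - pvCountPF 2 (by norm_num) (n - m)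
  let five_count := pvCountPF 5 (by norm_num) n - pvCountPF 5 (by norm_num) m - pvCountPF 5 (by norm_num) (n - m)
  min two_count five_count

-- ===== PORT B =====
-- B's digit-sum loop `while t > 0: s += t % p; t //= p`, written as recursion.
def pvDigitSum (p : Int) (hp : 2 ≤ p) (t : Int) : Int :=
  if _h : 0 < t then
    PySem.Int.mod t p + pvDigitSum p hp (PySem.Int.floordiv t p)
  else 0
termination_by t.toNat
decreasing_by
  have hlt : PySem.Int.floordiv t p < t := pv_floordiv_lt p t hp (by omega)
  omega

def pvLegendre (p : Int) (hp : 2 ≤ p) (k : Int) : Int :=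
  if k ≤ 0 then 0
  else PySem.Int.floordiv (k - pvDigitSum p hp k) (p - 1)

def combination_zeros_alt (n : Int) (m : Int) : Int :=
  let two_count := pvLegendre 2 (by norm_num) n - pvLegendre 2 (by norm_num) m - pvLegendre 2 (by norm_num) (n - m)
  let five_count := pvLegendre 5 (by norm_num) n - pvLegendre 5 (by norm_num) m - pvLegendre 5 (by norm_num) (n - m)
  min two_count five_count

-- ===== PRECONDITION & SPEC =====
def Spec_combination_zeros (n : Int) (m : Int) (out : Int) : Prop := out = combination_zeros_alt n m
instance (n : Int) (m : Int) (out : Int) : Decidable (Spec_combination_zeros n m out) := by unfold Spec_combination_zeros; infer_instance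

-- ===== CLAIM (what is proved, stated in full; the proofs are below) =====
def Claim_equal_combination_zeros : Prop := ∀ (n : Int) (m : Int), Dom_combination_zeros n m → Spec_combination_zeros n m (combination_zeros n m)

-- ===== LEMMAS AND PROOFS =====

theorem pv_floordiv_nonneg (p k : Int) (hp : 2 ≤ p) (hk : 0 ≤ k) : 0 ≤ PySem.Int.floordiv k p := by
  rw [PySem.Int.le_floordiv_iff_mul_le (by omega)]
  simpa using hk

-- Core fact: A's accumulation loop computes the digit-sum closed form.
theorem pvCountPF_eq_legendre (p : Int) (hp : 2 ≤ p) :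
    ∀ (N : Nat) (k : Int), k.toNat ≤ N → pvCountPF p hp k = pvLegendre p hp k := by
  intro N
  induction N with
  | zero =>
    intro k hk
    have hk0 : k ≤ 0 := by omega
    rw [pvCountPF, pvLegendre]
    simp [show ¬ p ≤ k by omega, hk0]
  | succ N ih =>
    intro k hk
    have hpos : 0 < p := by omega
    have hfd : ∀ a : Int, PySem.Int.floordiv a p = a / p :=
      fun a => PySem.Int.floordiv_eq_ediv_of_pos hpos
    by_cases hk0 : k ≤ 0
    · rw [pvCountPF, pvLegendre]
      simp [show ¬ p ≤ k by omega, hk0]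
    · by_cases hkp : p ≤ k
      · -- loop step
        have hq : PySem.Int.floordiv k p = k / p := hfd k
        have hlt : k / p < k := by have := pv_floordiv_lt p k hp (by omega); omega
        have hq0 : 0 ≤ k / p := by have := pv_floordiv_nonneg p k hp (by omega); omega
        have hq1 : 1 ≤ k / p := by
          have := (PySem.Int.le_floordiv_iff_mul_le (a := k) (b := p) (q := 1) hpos).mpr (by omega)
          omega
        rw [pvCountPF]
        simp only [hkp, dif_pos, hq]
        rw [ih (k / p) (by omega)]
        -- right side
        rw [pvLegendre, pvLegendre]
        simp only [show ¬ k ≤ 0 by omega, if_false, show ¬ k / p ≤ 0 by omega, if_false]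
        have hmod : PySem.Int.mod k p = k % p := PySem.Int.mod_eq_emod_of_pos hpos
        have hs : pvDigitSum p hp k = k % p + pvDigitSum p hp (k / p) := by
          rw [pvDigitSum, dif_pos (show (0:Int) < k by omega), hq, hmod]
        have hdiv : k / p * p + k % p = k := by have h := Int.mul_ediv_add_emod k p; linarith
        have hkey : k - (k % p + pvDigitSum p hp (k / p))
            = (k / p - pvDigitSum p hp (k / p)) + (k / p) * (p - 1) := by ring_nf; omega
        simp only [PySem.Int.floordiv_eq_ediv_of_pos (show (0:Int) < p - 1 by omega)]
        rw [hs, hkey, Int.add_mul_ediv_right _ _ (by omega : p - 1 ≠ 0)]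
        ring
      · -- 0 < k < p : one digit, result 0 on both sides
        rw [pvCountPF, pvLegendre]
        simp only [hkp, dif_neg, not_false_iff, show ¬ k ≤ 0 by omega, if_false]
        rw [pvDigitSum]
        simp only [show (0:Int) < k by omega, dif_pos]
        have hq : PySem.Int.floordiv k p = k / p := hfd k
        have hq0 : k / p = 0 := Int.ediv_eq_zero_of_lt (by omega) (by omega)
        rw [hq, hq0, pvDigitSum]
        simp only [show ¬ (0:Int) < 0 by omega, dif_neg, not_false_iff]
        have hmod : PySem.Int.mod k p = k % p := PySem.Int.mod_eq_emod_of_pos hpos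
        have : k % p = k := Int.emod_eq_of_lt (by omega) (by omega)
        have h0 : k - (k + 0) = (0:Int) := by ring
        rw [hmod, this, h0, PySem.Int.floordiv_eq_ediv_of_pos (by omega : (0:Int) < p - 1)]
        simp

theorem pvCountPF_eq_legendre' (p : Int) (hp : 2 ≤ p) (k : Int) :
    pvCountPF p hp k = pvLegendre p hp k :=
  pvCountPF_eq_legendre p hp k.toNat k le_rfl

-- ===== VERDICT (by name: the statement is the Claim_ definition above) =====
theorem combination_zeros_spec : Claim_equal_combination_zeros := by
  intro n m _
  unfold Spec_combination_zeros combination_zeros combination_zeros_alt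
  simp only [pvCountPF_eq_legendre']
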